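-- pv_equiv track=rewrite | github.com/gardouin/klee-reach | klee-reach-utils/kreachdist/utils/CallPaths.py | transpose_g_call
-- ===== SOURCE A (Python) =====
-- from typing import Mapping, Tuple, List
--
-- def transpose_g_call(
-- 		g_call: Mapping[Tuple[str, int], Tuple[str, int]]
-- 	) -> Mapping[Tuple[str, int], List[Tuple[str, int]]]:
-- 	"""
-- 	Computes the transpose graph of G_call
-- 	"""
-- 	g_call_t = {}
-- 	for key in g_call:
-- 		if g_call_t.get(g_call.get(key)) == None:
-- 			g_call_t[g_call.get(key)] = [key]
-- 		else:
-- 			g_call_t[g_call.get(key)].append(key)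
-- 	return g_call_t
-- ===== SOURCE B (Python) =====
-- def transpose_g_call(g_call):
-- 	values = list(dict.fromkeys(g_call.values()))
-- 	return {v: [k for k in g_call if g_call[k] == v] for v in values}
-- ===== Notes on version B (the rewrite author's own statement) =====
-- stated objective: alternative
-- what changed: B drops A's single-pass bucket accumulation entirely: it first dedupes the values (dict.fromkeys keeps first-appearance order), then builds each group by a separate full scan of the mapping filtering the keys whose value matches, trading A's O(n) hash accumulation for an O(n*m) staged scan.
import Mathlib
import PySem

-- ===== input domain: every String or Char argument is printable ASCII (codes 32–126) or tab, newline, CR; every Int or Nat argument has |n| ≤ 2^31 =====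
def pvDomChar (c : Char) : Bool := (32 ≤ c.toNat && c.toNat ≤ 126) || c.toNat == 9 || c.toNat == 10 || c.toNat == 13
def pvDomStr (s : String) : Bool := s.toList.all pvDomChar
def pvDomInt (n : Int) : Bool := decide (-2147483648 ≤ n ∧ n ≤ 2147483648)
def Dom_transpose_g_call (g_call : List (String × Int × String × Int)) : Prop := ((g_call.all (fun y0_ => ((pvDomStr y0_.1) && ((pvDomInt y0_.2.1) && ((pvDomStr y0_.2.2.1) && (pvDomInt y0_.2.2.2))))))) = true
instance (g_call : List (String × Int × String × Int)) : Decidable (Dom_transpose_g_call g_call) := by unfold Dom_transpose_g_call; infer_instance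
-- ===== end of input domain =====

-- B abandons A's single-pass bucket accumulation: it dedupes the values first, then builds each group by a separate filtering scan of the mapping (objective: alternative).


-- ===== PORT A =====
-- 'for key in g_call' iterates the dict's pairs; under Pre_ (distinct keys) g_call.get(key) is the value paired with key.
def transpose_g_call (g_call : List (String × Int × String × Int)) : List (String × Int × List (String × Int)) :=
  (g_call.foldl (fun acc e =>
      match PySem.Dict.get? acc e.2.2 with                                 -- g_call_t.get(v) == None ?
      | none => PySem.Dict.insert acc e.2.2 [(e.1, e.2.1)]                 -- g_call_t[v] = [key]
      | some l => PySem.Dict.insert acc e.2.2 (l ++ [(e.1, e.2.1)]))       -- g_call_t[v].append(key) (in-place)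
      (PySem.Dict.empty : PySem.Dict (String × Int) (List (String × Int)))).items.map (fun p => (p.1.1, p.1.2, p.2))

-- ===== PORT B =====
-- values = list(dict.fromkeys(g_call.values())): the distinct values in first-appearance order.
-- {v: [k for k in g_call if g_call[k] == v] for v in values}; under Pre_ (distinct keys) g_call[k] is k's paired value.
def transpose_g_call_alt (g_call : List (String × Int × String × Int)) : List (String × Int × List (String × Int)) :=
  (PySem.Set.ofList (g_call.map (fun e => e.2.2))).map (fun v =>
    (v.1, v.2, (g_call.filter (fun e => e.2.2 == v)).map (fun e => (e.1, e.2.1))))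

-- ===== PRECONDITION & SPEC =====
-- Pre_ excludes association lists with duplicate keys: they do not encode a Python dict (building the dict collapses them),
-- so neither Python program ever receives them.
def Pre_transpose_g_call (g_call : List (String × Int × String × Int)) : Prop :=
  (g_call.map (fun e => (e.1, e.2.1))).Nodup
instance (g_call : List (String × Int × String × Int)) : Decidable (Pre_transpose_g_call g_call) := by unfold Pre_transpose_g_call; infer_instance
def pvWitness_transpose_g_call : (List (String × Int × String × Int)) := [("f", 1, "g", 2), ("h", 3, "g", 2)]
def Spec_transpose_g_call (g_call : List (String × Int × String × Int)) (out : List (String × Int × List (String × Int))) : Prop := out = transpose_g_call_alt g_call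
instance (g_call : List (String × Int × String × Int)) (out : List (String × Int × List (String × Int))) : Decidable (Spec_transpose_g_call g_call out) := by unfold Spec_transpose_g_call; infer_instance

-- ===== CLAIM (what is proved, stated in full; the proofs are below) =====
def Claim_equal_transpose_g_call : Prop := ∀ (g_call : List (String × Int × String × Int)), Dom_transpose_g_call g_call → Pre_transpose_g_call g_call → Spec_transpose_g_call g_call (transpose_g_call g_call)

-- ===== LEMMAS AND PROOFS =====

-- A's branch on get(v) == None is exactly Dict.modify v [] (· ++ [key]).
theorem stepA_eq_modify (d : PySem.Dict (String × Int) (List (String × Int)))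
    (e : String × Int × String × Int) :
    (match PySem.Dict.get? d e.2.2 with
      | none => PySem.Dict.insert d e.2.2 [(e.1, e.2.1)]
      | some l => PySem.Dict.insert d e.2.2 (l ++ [(e.1, e.2.1)])) =
    PySem.Dict.modify d e.2.2 [] (· ++ [(e.1, e.2.1)]) := by
  cases h : PySem.Dict.get? d e.2.2 with
  | none => simp [PySem.Dict.modify, PySem.Dict.getD_eq_get?_getD, h]
  | some l => simp [PySem.Dict.modify, PySem.Dict.getD_eq_get?_getD, h]

-- A's accumulation, run from the empty dict, yields exactly B's groups.
theorem foldl_modify_items (g : List (String × Int × String × Int)) :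
    (g.foldl (fun acc e => PySem.Dict.modify acc e.2.2 [] (· ++ [(e.1, e.2.1)]))
      (PySem.Dict.empty : PySem.Dict (String × Int) (List (String × Int)))).items =
    (PySem.Set.ofList (g.map (fun e => e.2.2))).map (fun v =>
      (v, (g.filter (fun e => e.2.2 == v)).map (fun e => (e.1, e.2.1)))) := by
  have hnd' := PySem.Dict.nodup_keys_foldl_modify_key g (fun e => e.2.2) []
    (fun _ e => (· ++ [(e.1, e.2.1)]))
    (PySem.Dict.empty : PySem.Dict (String × Int) (List (String × Int))) PySem.Dict.nodup_keys_empty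
  have hget' : ∀ v, (g.foldl (fun acc e => PySem.Dict.modify acc e.2.2 [] (· ++ [(e.1, e.2.1)]))
      (PySem.Dict.empty : PySem.Dict (String × Int) (List (String × Int)))).getD v []
      = (g.filter (fun e => e.2.2 == v)).map (fun e => (e.1, e.2.1)) := by
    intro v
    have h2 := PySem.Dict.getD_foldl_modify_append
      (l := g.map (fun e => (e.2.2, (e.1, e.2.1))))
      (d := (PySem.Dict.empty : PySem.Dict (String × Int) (List (String × Int)))) (c := v)
    simp only [List.foldl_map] at h2
    rw [h2, PySem.Dict.getD_empty, List.filter_map, List.map_map]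
    simp [Function.comp_def]
  rw [PySem.Dict.items_eq_map_keys _ hnd' [], PySem.Dict.keys_foldl_modify_key,
      PySem.Dict.keys_empty, PySem.Set.update_nil_left]
  exact List.map_congr_left (fun v _ => by rw [hget' v])

theorem transpose_g_call_spec : Claim_equal_transpose_g_call := by
  intro g _ _
  unfold Spec_transpose_g_call transpose_g_call transpose_g_call_alt
  have hstep : g.foldl (fun acc e =>
      match PySem.Dict.get? acc e.2.2 with
      | none => PySem.Dict.insert acc e.2.2 [(e.1, e.2.1)]
      | some l => PySem.Dict.insert acc e.2.2 (l ++ [(e.1, e.2.1)]))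
      PySem.Dict.empty =
      g.foldl (fun acc e => PySem.Dict.modify acc e.2.2 [] (· ++ [(e.1, e.2.1)]))
      PySem.Dict.empty := by
    apply PySem.List.foldl_congr_mem; intro acc e _; exact stepA_eq_modify acc e
  rw [hstep, foldl_modify_items, List.map_map]
  rfl
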